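-- pv_equiv track=rewrite | github.com/swithun-liu/swithun-liu.github.io | source/original/output.py | find_markers_in_files
-- ===== SOURCE A (Python) =====
-- def find_markers_in_files(slink_id, file_contents):
--     """
--     在所有文件中查找指定 slink_id 的 begin 和 end 标记。
--     """
--     start_marker = f"(begin@@@{slink_id})"
--     end_marker = f"(end@@@{slink_id})"
--
--     start_match, end_match = None, None
--     for file_path, content in file_contents.items():
--         if not start_match:
--             start_index = content.find(start_marker)
--             if start_index != -1:
--                 start_match = (file_path, start_index + len(start_marker))
--         if not end_match:
--             end_index = content.find(end_marker)
--             if end_index != -1: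
--                 end_match = (file_path, end_index)
--         if start_match and end_match:
--             break
--
--     return start_match, end_match
-- ===== SOURCE B (Python) =====
-- def _find_first(file_contents, marker):
--     """Return (file_path, index) for the first file whose content contains marker, else None."""
--     for file_path, content in file_contents.items():
--         idx = content.find(marker)
--         if idx != -1:
--             return (file_path, idx)
--     return None
--
--
-- def find_markers_in_files(slink_id, file_contents):
--     start_marker = f"(begin@@@{slink_id})"
--     hit = _find_first(file_contents, start_marker)
--     start_match = (hit[0], hit[1] + len(start_marker)) if hit is not None else None
--     end_match = _find_first(file_contents, f"(end@@@{slink_id})")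
--     return start_match, end_match
-- ===== Notes on version B (the rewrite author's own statement) =====
-- stated objective: simpler
-- what changed: Replaces the single interleaved loop carrying two partial-result accumulators and a joint break with a reusable one-marker scan helper called twice (once per marker), the start offset adjusted after the scan.
import Mathlib
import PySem

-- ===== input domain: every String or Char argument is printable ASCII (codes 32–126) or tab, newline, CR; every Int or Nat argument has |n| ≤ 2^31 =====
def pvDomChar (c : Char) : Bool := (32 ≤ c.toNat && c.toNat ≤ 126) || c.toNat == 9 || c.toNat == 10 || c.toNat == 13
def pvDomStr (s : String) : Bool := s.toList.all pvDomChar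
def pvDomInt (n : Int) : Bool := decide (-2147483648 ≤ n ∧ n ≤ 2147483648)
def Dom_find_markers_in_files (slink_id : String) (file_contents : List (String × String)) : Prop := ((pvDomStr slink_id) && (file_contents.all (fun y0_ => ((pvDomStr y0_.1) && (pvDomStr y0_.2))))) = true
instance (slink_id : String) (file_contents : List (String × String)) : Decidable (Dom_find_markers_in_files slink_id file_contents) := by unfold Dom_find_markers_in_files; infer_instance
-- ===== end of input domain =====

-- B: the interleaved two-accumulator loop of A becomes a reusable one-marker scan helper called twice (simpler decomposition; return value only).

-- ===== PORT A =====
-- the for-loop over file_contents.items() with the two accumulators and the joint break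
def findMarkersLoop (sm em : String) : List (String × String) → Option (String × Int) → Option (String × Int) → (Option (String × Int)) × (Option (String × Int))
  | [], s, e => (s, e)
  | (fp, content) :: rest, s, e =>
    let s' := if s.isNone then
        let si := PySem.Str.find content sm
        if si ≠ -1 then some (fp, si + PySem.Str.len sm) else none
      else s
    let e' := if e.isNone then
        let ei := PySem.Str.find content em
        if ei ≠ -1 then some (fp, ei) else none
      else e
    if s'.isSome && e'.isSome then (s', e') else findMarkersLoop sm em rest s' e'

def find_markers_in_files (slink_id : String) (file_contents : List (String × String)) : (Option (String × Int)) × (Option (String × Int)) :=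
  let start_marker := "(begin@@@" ++ slink_id ++ ")"
  let end_marker := "(end@@@" ++ slink_id ++ ")"
  findMarkersLoop start_marker end_marker file_contents none none

-- ===== PORT B =====
-- _find_first: first (file_path, index) whose content contains the marker, else none
def findFirstMarker (marker : String) : List (String × String) → Option (String × Int)
  | [] => none
  | (fp, content) :: rest =>
    let idx := PySem.Str.find content marker
    if idx ≠ -1 then some (fp, idx) else findFirstMarker marker rest

def find_markers_in_files_alt (slink_id : String) (file_contents : List (String × String)) : (Option (String × Int)) × (Option (String × Int)) :=
  let start_marker := "(begin@@@" ++ slink_id ++ ")"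
  let hit := findFirstMarker start_marker file_contents
  let start_match := match hit with
    | some (fp, i) => some (fp, i + PySem.Str.len start_marker)
    | none => none
  let end_match := findFirstMarker ("(end@@@" ++ slink_id ++ ")") file_contents
  (start_match, end_match)

-- ===== PRECONDITION & SPEC =====
def Spec_find_markers_in_files (slink_id : String) (file_contents : List (String × String)) (out : (Option (String × Int)) × (Option (String × Int))) : Prop := out = find_markers_in_files_alt slink_id file_contents
instance (slink_id : String) (file_contents : List (String × String)) (out : (Option (String × Int)) × (Option (String × Int))) : Decidable (Spec_find_markers_in_files slink_id file_contents out) := by unfold Spec_find_markers_in_files; infer_instance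

-- ===== CLAIM (what is proved, stated in full; the proofs are below) =====
def Claim_equal_find_markers_in_files : Prop := ∀ (slink_id : String) (file_contents : List (String × String)), Dom_find_markers_in_files slink_id file_contents → Spec_find_markers_in_files slink_id file_contents (find_markers_in_files slink_id file_contents)

-- ===== LEMMAS AND PROOFS =====

-- ===== VERDICT (by name: the statement is the Claim_ definition above) =====
-- invariant: the loop's two accumulators, once filled, freeze; otherwise each component
-- is the first hit of its own marker in the remaining list
theorem findMarkersLoop_eq (sm em : String) (xs : List (String × String))
    (s e : Option (String × Int)) :
    findMarkersLoop sm em xs s e =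
      (s.orElse (fun _ => (findFirstMarker sm xs).map (fun p => (p.1, p.2 + PySem.Str.len sm))),
       e.orElse (fun _ => findFirstMarker em xs)) := by
  induction xs generalizing s e with
  | nil => cases s <;> cases e <;> simp [findMarkersLoop, findFirstMarker]
  | cons hd tl ih =>
    obtain ⟨fp, content⟩ := hd
    simp only [findMarkersLoop, findFirstMarker]
    cases s <;> cases e <;>
      simp only [Option.isNone, Option.orElse, if_true] <;>
      split_ifs <;>
      simp_all

theorem find_markers_in_files_spec : Claim_equal_find_markers_in_files := by
  intro slink_id file_contents _
  unfold Spec_find_markers_in_files find_markers_in_files find_markers_in_files_alt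
  rw [findMarkersLoop_eq]
  cases h : findFirstMarker ("(begin@@@" ++ slink_id ++ ")") file_contents with
  | none => simp [h, Option.orElse]
  | some p => obtain ⟨fp, i⟩ := p; simp [h, Option.orElse]
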